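-- pv_equiv track=rewrite | github.com/rodonguyen/practice_data_structures | old/test4.py | get_the_popular_next
-- ===== SOURCE A (Python) =====
-- from dataclasses import dataclass
-- from typing import Dict, List
--
-- @dataclass
-- class Tracker:
--     course_id: str
--     counter: Dict
--     most_popular_next: str
--     most_popular_counter: int = 1
--
--     def add_next_watched_course(self, next_course_id):
--         # increase counter
--         self.counter[next_course_id] = self.counter.get(next_course_id, 0) + 1
--
--         # update most popular next if applicable
--         if self.counter[next_course_id] > self.most_popular_counter:
--             self.most_popular_counter += 1
--             self.most_popular_next = next_course_id
--
-- def get_the_popular_next(input: List[List]):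
--     trackers: Dict[str, Tracker] = {}
--     for course_history in input:
--         for i in range(len(course_history) - 1):
--             course_id = course_history[i]
--             next_course_id = course_history[i + 1]
--             if not trackers.get(course_id, False):
--                 trackers[course_id] = Tracker(
--                     course_id=course_id,
--                     counter={next_course_id: 1},
--                     most_popular_next=next_course_id,
--                 )
--             else:
--                 trackers[course_id].add_next_watched_course(next_course_id)
--
--     result = []
--     for course_id, tracker in trackers.items():
--         result.append([course_id, tracker.most_popular_next])
--
--     return result
-- ===== SOURCE B (Python) =====
-- from collections import defaultdict
--
-- def get_the_popular_next(input):
--     # group: course -> ordered list of next-course ids, one pass over all histories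
--     nexts = defaultdict(list)
--     for history in input:
--         for course, nxt in zip(history, history[1:]):
--             nexts[course].append(nxt)
--     # reduce: streaming running-argmax per course (first to strictly exceed wins)
--     result = []
--     for course, ns in nexts.items():
--         counts = {}
--         best = None
--         best_count = 0
--         for nxt in ns:
--             c = counts.get(nxt, 0) + 1
--             counts[nxt] = c
--             if c > best_count:
--                 best_count = c
--                 best = nxt
--         result.append([course, best])
--     return result
-- ===== Notes on version B (the rewrite author's own statement) =====
-- stated objective: simpler
-- what changed: Replaces the Tracker dataclass and the interleaved build-and-update single pass by a group-then-reduce decomposition: one grouping pass collects each course's ordered list of next-course ids into a defaultdict(list), then a per-course streaming running-argmax (strict '>' in original order, so tie-breaking is identical) picks the most popular next.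
import Mathlib
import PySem

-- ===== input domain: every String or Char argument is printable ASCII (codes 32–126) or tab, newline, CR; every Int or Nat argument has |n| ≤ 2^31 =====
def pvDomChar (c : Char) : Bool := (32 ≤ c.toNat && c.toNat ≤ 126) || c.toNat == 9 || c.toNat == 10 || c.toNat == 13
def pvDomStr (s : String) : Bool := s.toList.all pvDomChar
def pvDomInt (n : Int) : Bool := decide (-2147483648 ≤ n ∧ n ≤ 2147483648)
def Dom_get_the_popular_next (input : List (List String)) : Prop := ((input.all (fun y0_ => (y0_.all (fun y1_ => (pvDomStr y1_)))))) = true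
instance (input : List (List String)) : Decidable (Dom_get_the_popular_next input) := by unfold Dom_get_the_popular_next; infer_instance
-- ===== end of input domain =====

-- B replaces A's interleaved single pass with a Tracker dataclass by a group-then-reduce
-- decomposition (group next-ids per course, then a streaming running-argmax per course); same cost, simpler.

-- ===== PORT A =====
-- Tracker dataclass as a triple: (counter, most_popular_next, most_popular_counter)
def pvTrkAdd (t : PySem.Dict String Int × String × Int) (next_course_id : String) :
    PySem.Dict String Int × String × Int :=
  let counter := t.1.insert next_course_id (t.1.getD next_course_id 0 + 1)
  if counter.getD next_course_id 0 > t.2.2 then (counter, next_course_id, t.2.2 + 1)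
  else (counter, t.2.1, t.2.2)

def get_the_popular_next (input : List (List String)) : List (List String) :=
  let trackers : PySem.Dict String (PySem.Dict String Int × String × Int) :=
    input.foldl (fun trackers course_history =>
      (PySem.List.pyRange 0 ((course_history.length : Int) - 1) 1).foldl (fun trackers i =>
        -- i and i+1 are always in range here, so the .getD "" default is never taken
        let course_id := (PySem.List.pyGet? course_history i).getD ""
        let next_course_id := (PySem.List.pyGet? course_history (i + 1)).getD ""
        -- 'not trackers.get(course_id, False)': a Tracker instance is always truthy,
        -- so this branch fires exactly when course_id is absent
        if (trackers.get? course_id).isSome = false then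
          trackers.insert course_id (PySem.Dict.ofList [(next_course_id, 1)], next_course_id, 1)
        else
          trackers.modify course_id (PySem.Dict.empty, "", 1) (fun t => pvTrkAdd t next_course_id))
        trackers)
      PySem.Dict.empty
  trackers.items.foldl (fun result p => result ++ [[p.1, p.2.2.1]]) []

-- ===== PORT B =====
-- streaming running-argmax over ns: state (counts, best, best_count); best starts as None
-- (B only calls this on nonempty ns, so the final .getD "" is never the value returned)
def pvMostPopular (ns : List String) : String :=
  ((ns.foldl (fun st nxt =>
      let c := st.1.getD nxt 0 + 1
      let counts := st.1.insert nxt c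
      if c > st.2.2 then (counts, some nxt, c) else (counts, st.2.1, st.2.2))
    ((PySem.Dict.empty : PySem.Dict String Int), (none : Option String), (0 : Int))).2.1).getD ""

def get_the_popular_next_alt (input : List (List String)) : List (List String) :=
  let nexts : PySem.Dict String (List String) :=
    input.foldl (fun nexts history =>
      (history.zip (PySem.List.slice history (some 1) none)).foldl
        (fun nexts p => nexts.modify p.1 [] (fun ns => ns ++ [p.2])) nexts)
      PySem.Dict.empty
  nexts.items.map (fun p => [p.1, pvMostPopular p.2])

-- ===== PRECONDITION & SPEC =====
def Spec_get_the_popular_next (input : List (List String)) (out : List (List String)) : Prop := out = get_the_popular_next_alt input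
instance (input : List (List String)) (out : List (List String)) : Decidable (Spec_get_the_popular_next input out) := by unfold Spec_get_the_popular_next; infer_instance

-- ===== CLAIM (what is proved, stated in full; the proofs are below) =====
def Claim_equal_get_the_popular_next : Prop := ∀ (input : List (List String)), Dom_get_the_popular_next input → Spec_get_the_popular_next input (get_the_popular_next input)

-- ===== LEMMAS AND PROOFS =====

-- the flat stream of adjacent pairs, in A's (and B's) traversal order
def pvPairs (input : List (List String)) : List (String × String) :=
  input.flatMap (fun h => h.zip h.tail)

def pvStepA (d : PySem.Dict String (PySem.Dict String Int × String × Int)) (p : String × String) :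
    PySem.Dict String (PySem.Dict String Int × String × Int) :=
  if (d.get? p.1).isSome = false then
    d.insert p.1 (PySem.Dict.ofList [(p.2, 1)], p.2, 1)
  else
    d.modify p.1 (PySem.Dict.empty, "", 1) (fun t => pvTrkAdd t p.2)

def pvStepB (st : PySem.Dict String Int × Option String × Int) (nxt : String) :
    PySem.Dict String Int × Option String × Int :=
  let c := st.1.getD nxt 0 + 1
  let counts := st.1.insert nxt c
  if c > st.2.2 then (counts, some nxt, c) else (counts, st.2.1, st.2.2)

def pvNextsOf (c : String) (ps : List (String × String)) : List String :=
  (ps.filter (fun p => p.1 == c)).map (·.2)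

-- the per-history index loop of A is the fold over adjacent pairs
lemma pv_pairs_map (h : List String) :
    (PySem.List.pyRange 0 ((h.length : Int) - 1) 1).map
      (fun i => ((PySem.List.pyGet? h i).getD "", (PySem.List.pyGet? h (i + 1)).getD ""))
      = h.zip h.tail := by
  rw [PySem.List.pyRange_one, List.map_map]
  have hm : (((h.length : Int) - 1) - 0).toNat = h.length - 1 := by omega
  rw [hm]
  apply List.ext_getElem
  · simp [List.length_zip, List.length_tail]
  · intro i h1 h2
    simp only [List.getElem_map, List.getElem_range, Function.comp_apply, List.getElem_zip,
      List.getElem_tail]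
    have hi : i < h.length - 1 := by simpa using h1
    have e1 : ((0 : Int) + (i : Int)) = ((i : Nat) : Int) := by omega
    have e2 : ((i : Nat) : Int) + 1 = (((i + 1 : Nat)) : Int) := by omega
    rw [e1, e2, PySem.List.pyGet?_natCast, PySem.List.pyGet?_natCast,
      List.getElem?_eq_getElem (by omega), List.getElem?_eq_getElem (by omega)]
    rfl

lemma pv_A_flat (input : List (List String)) :
    (input.foldl (fun trackers course_history =>
      (PySem.List.pyRange 0 ((course_history.length : Int) - 1) 1).foldl (fun trackers i =>
        let course_id := (PySem.List.pyGet? course_history i).getD ""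
        let next_course_id := (PySem.List.pyGet? course_history (i + 1)).getD ""
        if (trackers.get? course_id).isSome = false then
          trackers.insert course_id (PySem.Dict.ofList [(next_course_id, 1)], next_course_id, 1)
        else
          trackers.modify course_id (PySem.Dict.empty, "", 1) (fun t => pvTrkAdd t next_course_id))
        trackers)
      PySem.Dict.empty)
    = (pvPairs input).foldl pvStepA PySem.Dict.empty := by
  rw [pvPairs, List.foldl_flatMap]
  congr 1
  funext tr h
  rw [← pv_pairs_map h, List.foldl_map]
  rfl

lemma pv_B_flat (input : List (List String)) :
    (input.foldl (fun nexts history =>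
      (history.zip (PySem.List.slice history (some 1) none)).foldl
        (fun nexts p => nexts.modify p.1 [] (fun ns => ns ++ [p.2])) nexts)
      PySem.Dict.empty)
    = (pvPairs input).foldl (fun d p => d.modify p.1 [] (fun ns => ns ++ [p.2])) PySem.Dict.empty := by
  rw [pvPairs, List.foldl_flatMap]
  congr 1
  funext tr h
  rw [PySem.List.slice_from_one]

lemma pv_A_keys (ps : List (String × String))
    (d : PySem.Dict String (PySem.Dict String Int × String × Int)) :
    (ps.foldl pvStepA d).keys = PySem.Set.update d.keys (ps.map (·.1)) := by
  induction ps generalizing d with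
  | nil => simp [PySem.Set.update_nil]
  | cons p ps ih =>
    rw [List.foldl_cons, ih, List.map_cons, PySem.Set.update_cons]
    congr 1
    unfold pvStepA
    by_cases hs : (d.get? p.1).isSome
    · have hcont : d.contains p.1 = true := by
        rw [PySem.Dict.contains_eq_isSome_get?, hs]
      simp only [hs, Bool.true_eq_false, if_false]
      rw [PySem.Set.add_of_mem ((PySem.Dict.contains_iff_mem_keys _ _).mp hcont)]
      exact PySem.Dict.keys_insert_of_contains _ _ hcont
    · simp only [Bool.not_eq_true] at hs
      simp only [hs, if_pos]
      rw [PySem.Dict.keys_insert_of_not_contains, PySem.Set.add_of_not_mem]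
      · rw [← PySem.Dict.get?_eq_none_iff_not_mem_keys]
        simpa using hs
      · rw [PySem.Dict.contains_eq_isSome_get?, hs]

lemma pv_stepA_isSome (d : PySem.Dict String (PySem.Dict String Int × String × Int))
    (p : String × String) (c : String) :
    ((pvStepA d p).get? c).isSome = ((d.get? c).isSome || decide (c = p.1)) := by
  unfold pvStepA
  have hmod : d.modify p.1 (PySem.Dict.empty, "", 1) (fun t => pvTrkAdd t p.2)
      = d.insert p.1 (pvTrkAdd (d.getD p.1 (PySem.Dict.empty, "", 1)) p.2) := rfl
  by_cases hs : (d.get? p.1).isSome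
  · simp only [hs, Bool.true_eq_false, if_false, hmod, PySem.Dict.get?_insert]
    by_cases hc : c = p.1 <;> simp [hc, hs]
  · simp only [Bool.not_eq_true] at hs
    simp only [hs, if_pos, PySem.Dict.get?_insert]
    by_cases hc : c = p.1 <;> simp [hc, hs]

lemma pv_stepA_getD (d : PySem.Dict String (PySem.Dict String Int × String × Int))
    (p : String × String) (c : String) :
    (pvStepA d p).getD c (PySem.Dict.empty, "", 1)
      = if c = p.1 then
          (if (d.get? p.1).isSome then pvTrkAdd (d.getD p.1 (PySem.Dict.empty, "", 1)) p.2
           else (PySem.Dict.ofList [(p.2, 1)], p.2, 1))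
        else d.getD c (PySem.Dict.empty, "", 1) := by
  unfold pvStepA
  have hmod : d.modify p.1 (PySem.Dict.empty, "", 1) (fun t => pvTrkAdd t p.2)
      = d.insert p.1 (pvTrkAdd (d.getD p.1 (PySem.Dict.empty, "", 1)) p.2) := rfl
  by_cases hs : (d.get? p.1).isSome
  · simp only [hs, Bool.true_eq_false, if_false, if_true, hmod, PySem.Dict.getD_insert]
  · simp only [Bool.not_eq_true] at hs
    simp only [hs, if_pos, Bool.false_eq_true, if_false, PySem.Dict.getD_insert]

lemma pv_A_getD (ps : List (String × String))
    (d : PySem.Dict String (PySem.Dict String Int × String × Int)) (c : String) :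
    (ps.foldl pvStepA d).getD c (PySem.Dict.empty, "", 1)
      = if (d.get? c).isSome then
          (pvNextsOf c ps).foldl pvTrkAdd (d.getD c (PySem.Dict.empty, "", 1))
        else
          match pvNextsOf c ps with
          | [] => (PySem.Dict.empty, "", 1)
          | n :: rest => rest.foldl pvTrkAdd (PySem.Dict.ofList [(n, 1)], n, 1) := by
  induction ps generalizing d with
  | nil =>
    cases hget : d.get? c with
    | none => simp [pvNextsOf, PySem.Dict.getD_eq_get?_getD, hget]
    | some t => simp [pvNextsOf, PySem.Dict.getD_eq_get?_getD, hget]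
  | cons p ps ih =>
    have hnx : pvNextsOf c (p :: ps)
        = if p.1 = c then p.2 :: pvNextsOf c ps else pvNextsOf c ps := by
      simp only [pvNextsOf, List.filter_cons]
      by_cases h : p.1 = c <;> simp [h]
    rw [List.foldl_cons, ih, pv_stepA_isSome, pv_stepA_getD, hnx]
    by_cases hc : c = p.1
    · subst hc
      by_cases hs : (d.get? p.1).isSome
      · simp [hs]
      · simp only [Bool.not_eq_true] at hs
        simp [hs]
    · have hc1 : ¬ p.1 = c := fun h => hc h.symm
      simp [hc, hc1]

-- the two streaming argmaxes stay in lock-step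
lemma pv_lockstep (rest : List String) (d1 d2 : PySem.Dict String Int) (b : String) (m : Int)
    (hd : ∀ k, d1.getD k 0 = d2.getD k 0) (hinv : ∀ k, d1.getD k 0 ≤ m) :
    (rest.foldl pvStepB (d2, some b, m)).2.1 = some ((rest.foldl pvTrkAdd (d1, b, m)).2.1) := by
  induction rest generalizing d1 d2 b m with
  | nil => simp
  | cons x rest ih =>
    rw [List.foldl_cons, List.foldl_cons]
    have hdx : d2.getD x 0 = d1.getD x 0 := (hd x).symm
    by_cases hgt : d1.getD x 0 + 1 > m
    · have hm : d1.getD x 0 + 1 = m + 1 := by have := hinv x; omega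
      have hA : pvTrkAdd (d1, b, m) x = (d1.insert x (m + 1), x, m + 1) := by
        unfold pvTrkAdd
        simp only [PySem.Dict.getD_insert_self, hm]
        simp
      have hB : pvStepB (d2, some b, m) x = (d2.insert x (m + 1), some x, m + 1) := by
        unfold pvStepB
        simp only [hdx, hm]
        simp
      rw [hA, hB]
      apply ih
      · intro k
        rw [PySem.Dict.getD_insert, PySem.Dict.getD_insert]
        split_ifs with h
        · rfl
        · exact hd k
      · intro k
        rw [PySem.Dict.getD_insert]
        split_ifs with h
        · omega
        · have := hinv k; omega
    · have hA : pvTrkAdd (d1, b, m) x = (d1.insert x (d1.getD x 0 + 1), b, m) := by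
        unfold pvTrkAdd
        simp only [PySem.Dict.getD_insert_self]
        simp only [gt_iff_lt, not_lt] at hgt ⊢
        rw [if_neg (by omega)]
      have hB : pvStepB (d2, some b, m) x = (d2.insert x (d1.getD x 0 + 1), some b, m) := by
        unfold pvStepB
        simp only [hdx]
        simp only [gt_iff_lt, not_lt] at hgt ⊢
        rw [if_neg (by omega)]
      rw [hA, hB]
      apply ih
      · intro k
        rw [PySem.Dict.getD_insert, PySem.Dict.getD_insert]
        split_ifs with h
        · rfl
        · exact hd k
      · intro k
        rw [PySem.Dict.getD_insert]
        split_ifs with h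
        · omega
        · exact hinv k

lemma pv_course (n : String) (rest : List String) :
    (rest.foldl pvTrkAdd (PySem.Dict.ofList [(n, 1)], n, 1)).2.1 = pvMostPopular (n :: rest) := by
  have hmp : pvMostPopular (n :: rest)
      = (((n :: rest).foldl pvStepB ((PySem.Dict.empty : PySem.Dict String Int),
          (none : Option String), (0 : Int))).2.1).getD "" := rfl
  have h1 : pvStepB ((PySem.Dict.empty : PySem.Dict String Int), (none : Option String), (0 : Int)) n
      = (PySem.Dict.empty.insert n 1, some n, 1) := by
    unfold pvStepB
    simp [PySem.Dict.getD_empty]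
  have hofl : (PySem.Dict.ofList [(n, (1 : Int))], n, (1 : Int))
      = ((PySem.Dict.empty : PySem.Dict String Int).insert n 1, n, (1 : Int)) := rfl
  have hinv : ∀ k, ((PySem.Dict.empty : PySem.Dict String Int).insert n 1).getD k 0 ≤ 1 := by
    intro k
    rw [PySem.Dict.getD_insert]
    split_ifs with h
    · omega
    · simp [PySem.Dict.getD_empty]
  rw [hmp, List.foldl_cons, h1, hofl,
    pv_lockstep rest (PySem.Dict.empty.insert n 1) (PySem.Dict.empty.insert n 1) n 1
      (fun _ => rfl) hinv]
  simp

-- ===== VERDICT (by name: the statement is the Claim_ definition above) =====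
theorem get_the_popular_next_spec : Claim_equal_get_the_popular_next := by
  intro input _
  unfold Spec_get_the_popular_next
  simp only [get_the_popular_next, get_the_popular_next_alt]
  rw [pv_A_flat, pv_B_flat]
  rw [PySem.List.foldl_append_singleton_eq_map, List.nil_append]
  have hKA := pv_A_keys (pvPairs input) PySem.Dict.empty
  have hKB : ((pvPairs input).foldl (fun d p => d.modify p.1 [] (fun ns => ns ++ [p.2]))
        PySem.Dict.empty).keys
      = PySem.Set.update (PySem.Dict.empty :
          PySem.Dict String (List String)).keys ((pvPairs input).map (·.1)) :=
    PySem.Dict.keys_foldl_modify_key _ _ _ _ _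
  rw [PySem.Dict.keys_empty] at hKA hKB
  have hndA : ((pvPairs input).foldl pvStepA PySem.Dict.empty).keys.Nodup := by
    rw [hKA, PySem.Set.update_nil_left]
    exact PySem.Set.nodup_ofList _
  have hndB : ((pvPairs input).foldl (fun d p => d.modify p.1 [] (fun ns => ns ++ [p.2]))
      PySem.Dict.empty).keys.Nodup := by
    rw [hKB, PySem.Set.update_nil_left]
    exact PySem.Set.nodup_ofList _
  rw [PySem.Dict.items_eq_map_keys _ hndA (PySem.Dict.empty, "", 1),
    PySem.Dict.items_eq_map_keys _ hndB [], List.map_map, List.map_map, hKA, hKB,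
    PySem.Set.update_nil_left]
  apply List.map_congr_left
  intro c hc
  simp only [Function.comp_apply]
  have hgB : ((pvPairs input).foldl (fun d p => d.modify p.1 [] (fun ns => ns ++ [p.2]))
        PySem.Dict.empty).getD c [] = pvNextsOf c (pvPairs input) := by
    rw [PySem.Dict.getD_foldl_modify_append, PySem.Dict.getD_empty, List.nil_append]
    rfl
  have hgA := pv_A_getD (pvPairs input) PySem.Dict.empty c
  rw [PySem.Dict.get?_empty] at hgA
  simp only [Option.isSome_none, Bool.false_eq_true, if_false] at hgA
  rw [hgA, hgB]
  have hmem : c ∈ (pvPairs input).map (·.1) := (PySem.Set.mem_ofList _ _).mp hc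
  obtain ⟨p, hp, hpc⟩ := List.mem_map.mp hmem
  have hne : pvNextsOf c (pvPairs input) ≠ [] := by
    unfold pvNextsOf
    intro hnil
    have : p ∈ (pvPairs input).filter (fun q => q.1 == c) :=
      List.mem_filter.mpr ⟨hp, by simp [hpc]⟩
    rw [List.map_eq_nil_iff.mp hnil] at this
    simp at this
  cases hn : pvNextsOf c (pvPairs input) with
  | nil => exact absurd hn hne
  | cons n restl =>
    simp only []
    rw [pv_course]
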